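-- pv_equiv track=rewrite | github.com/Vouxx111/Matrix8-Encryption | matrix8.py | spars_data
-- ===== SOURCE A (Python) =====
-- textEncoder = [
--     ['A', 'B', 'C', 'D', 'E', 'F', 'G', 'H'],
--     ['I', 'J', 'K', 'L', 'M', 'N', 'O', 'P'],
--     ['Q', 'R', 'S', 'T', 'U', 'V', 'W', 'X'],
--     ['Y', 'Z', 'a', 'b', 'c', 'd', 'e', 'f'],
--     ['g', 'h', 'i', 'j', 'k', 'l', 'm', 'n'],
--     ['o', 'p', 'q', 'r', 's', 't', 'u', 'v'],
--     ['w', 'x', 'y', 'z', '0', '1', '2', '3'],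
--     ['4', '5', '6', '7', '8', '9', '',  '']
-- ]
--
-- def find_position(char):
--     for rowIndex, row in enumerate(textEncoder):
--         for colIndex, item in enumerate(row):
--             if item == char:
--                 return (rowIndex, colIndex)
--     return None  # If not found
--
-- def spars_data(inputText):
--     newData = ""
--
--     for x in str(inputText):
--         location = find_position(x)
--         if location == None:
--             newData += x
--         else:
--             row, col = location
--             newData += f"{row}{col}"  # Combine row and col as string
--     return newData
-- ===== SOURCE B (Python) =====
-- # Closed-form arithmetic scheme: the 8x8 grid lists 'A'-'Z', 'a'-'z', '0'-'9'
-- # consecutively, so a character's flat index k is computed from its code point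
-- # and its coordinates are divmod(k, 8); no table and no scan is needed.
-- def spars_data(inputText):
--     out = []
--     for x in str(inputText):
--         if 'A' <= x <= 'Z':
--             k = ord(x) - ord('A')
--         elif 'a' <= x <= 'z':
--             k = ord(x) - ord('a') + 26
--         elif '0' <= x <= '9':
--             k = ord(x) - ord('0') + 52
--         else:
--             out.append(x)
--             continue
--         out.append(str(k // 8) + str(k % 8))
--     return ''.join(out)
-- ===== Notes on version B (the rewrite author's own statement) =====
-- stated objective: faster
-- what changed: Replaces the per-character nested grid scan with a closed-form arithmetic encoding: since the grid lists A-Z, a-z, 0-9 consecutively, each character's flat index is computed from its code point and the coordinates are divmod(index, 8), needing no table and no scan.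
import Mathlib
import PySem

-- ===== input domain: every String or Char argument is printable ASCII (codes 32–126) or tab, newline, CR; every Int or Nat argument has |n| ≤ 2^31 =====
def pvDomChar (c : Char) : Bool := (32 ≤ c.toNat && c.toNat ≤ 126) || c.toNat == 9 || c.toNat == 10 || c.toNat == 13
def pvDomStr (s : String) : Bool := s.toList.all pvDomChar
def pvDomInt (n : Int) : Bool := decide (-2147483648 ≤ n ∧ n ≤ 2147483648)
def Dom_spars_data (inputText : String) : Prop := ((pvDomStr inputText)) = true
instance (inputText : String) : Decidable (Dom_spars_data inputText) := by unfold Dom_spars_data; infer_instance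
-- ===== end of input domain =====

-- B replaces A's per-character nested grid scan with closed-form arithmetic on the code point
-- (the grid lists A-Z, a-z, 0-9 consecutively, so coordinates are divmod(flat index, 8)); objective: faster (constant-factor).

-- ===== PORT A =====
def textEncoder : List (List String) :=
  [["A", "B", "C", "D", "E", "F", "G", "H"],
   ["I", "J", "K", "L", "M", "N", "O", "P"],
   ["Q", "R", "S", "T", "U", "V", "W", "X"],
   ["Y", "Z", "a", "b", "c", "d", "e", "f"],
   ["g", "h", "i", "j", "k", "l", "m", "n"],
   ["o", "p", "q", "r", "s", "t", "u", "v"],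
   ["w", "x", "y", "z", "0", "1", "2", "3"],
   ["4", "5", "6", "7", "8", "9", "",  ""]]

-- inner 'for colIndex, item in enumerate(row)' with early return
def fpRow (rowIndex : Int) (char : String) : List (Int × String) → Option (Int × Int)
  | [] => none
  | (colIndex, item) :: rest =>
      if item == char then some (rowIndex, colIndex) else fpRow rowIndex char rest

-- outer 'for rowIndex, row in enumerate(textEncoder)' with early return
def fpRows (char : String) : List (Int × List String) → Option (Int × Int)
  | [] => none
  | (rowIndex, row) :: rest =>
      match fpRow rowIndex char (PySem.List.enumerate row 0) with
      | some p => some p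
      | none => fpRows char rest

def find_position (char : String) : Option (Int × Int) :=
  fpRows char (PySem.List.enumerate textEncoder 0)

def spars_data (inputText : String) : String :=
  String.ofList (inputText.toList.foldl
    (fun newData x =>
      match find_position (String.ofList [x]) with
      | none => newData ++ [x]
      | some (row, col) => newData ++ (PySem.Int.toChars row ++ PySem.Int.toChars col))
    [])

-- ===== PORT B =====
-- Source B's range tests "'A' <= x <= 'Z'" on single ASCII chars are code-point comparisons (exact here).
def spars_data_alt (inputText : String) : String :=
  PySem.Str.join ""
    (inputText.toList.foldl
      (fun out x =>
        let n : Int := x.toNat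
        if 65 ≤ n ∧ n ≤ 90 then
          out ++ [PySem.Int.toStr (PySem.Int.floordiv (n - 65) 8) ++ PySem.Int.toStr (PySem.Int.mod (n - 65) 8)]
        else if 97 ≤ n ∧ n ≤ 122 then
          out ++ [PySem.Int.toStr (PySem.Int.floordiv (n - 97 + 26) 8) ++ PySem.Int.toStr (PySem.Int.mod (n - 97 + 26) 8)]
        else if 48 ≤ n ∧ n ≤ 57 then
          out ++ [PySem.Int.toStr (PySem.Int.floordiv (n - 48 + 52) 8) ++ PySem.Int.toStr (PySem.Int.mod (n - 48 + 52) 8)]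
        else out ++ [String.ofList [x]])
      [])

-- ===== PRECONDITION & SPEC =====
def Spec_spars_data (inputText : String) (out : String) : Prop := out = spars_data_alt inputText
instance (inputText : String) (out : String) : Decidable (Spec_spars_data inputText out) := by unfold Spec_spars_data; infer_instance

-- ===== CLAIM (what is proved, stated in full; the proofs are below) =====
def Claim_equal_spars_data : Prop := ∀ (inputText : String), Dom_spars_data inputText → Spec_spars_data inputText (spars_data inputText)

-- ===== LEMMAS AND PROOFS =====

-- B's per-character encoding, factored out for the proof
def encB (x : Char) : String :=
  let n : Int := x.toNat
  if 65 ≤ n ∧ n ≤ 90 then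
    PySem.Int.toStr (PySem.Int.floordiv (n - 65) 8) ++ PySem.Int.toStr (PySem.Int.mod (n - 65) 8)
  else if 97 ≤ n ∧ n ≤ 122 then
    PySem.Int.toStr (PySem.Int.floordiv (n - 97 + 26) 8) ++ PySem.Int.toStr (PySem.Int.mod (n - 97 + 26) 8)
  else if 48 ≤ n ∧ n ≤ 57 then
    PySem.Int.toStr (PySem.Int.floordiv (n - 48 + 52) 8) ++ PySem.Int.toStr (PySem.Int.mod (n - 48 + 52) 8)
  else String.ofList [x]

def gridChars : List Char :=
  ['A','B','C','D','E','F','G','H','I','J','K','L','M','N','O','P','Q','R','S','T','U','V','W','X','Y','Z',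
   'a','b','c','d','e','f','g','h','i','j','k','l','m','n','o','p','q','r','s','t','u','v','w','x','y','z',
   '0','1','2','3','4','5','6','7','8','9']

theorem ofList_singleton_eq_iff (s : String) (c : Char) : String.ofList [c] = s ↔ s.toList = [c] := by
  constructor
  · intro h; rw [← h]; simp
  · intro h; rw [← String.ofList_toList (s := s), h]

theorem fpRow_none (ri : Int) (s : String) (l : List (Int × String)) (h : ∀ p ∈ l, p.2 ≠ s) :
    fpRow ri s l = none := by
  induction l with
  | nil => rfl
  | cons p rest ih =>
    obtain ⟨ci, item⟩ := p
    have h1 : item ≠ s := h (ci, item) (List.mem_cons_self ..)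
    simp only [fpRow, beq_iff_eq, if_neg h1]
    exact ih (fun q hq => h q (List.mem_cons_of_mem _ hq))

theorem fpRows_none (s : String) (l : List (Int × List String)) (h : ∀ p ∈ l, ∀ item ∈ p.2, item ≠ s) :
    fpRows s l = none := by
  induction l with
  | nil => rfl
  | cons p rest ih =>
    obtain ⟨ri, row⟩ := p
    have h1 : fpRow ri s (PySem.List.enumerate row 0) = none := by
      apply fpRow_none
      intro q hq
      obtain ⟨k, hk, rfl⟩ := (PySem.List.mem_enumerate_iff _ _ _).mp hq
      exact h (ri, row) (List.mem_cons_self ..) _ (List.getElem_mem hk)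
    simp only [fpRows, h1]
    exact ih (fun q hq => h q (List.mem_cons_of_mem _ hq))

theorem mem_gridChars_of_range (c : Char)
    (hr : (65 ≤ c.toNat ∧ c.toNat ≤ 90) ∨ (97 ≤ c.toNat ∧ c.toNat ≤ 122) ∨ (48 ≤ c.toNat ∧ c.toNat ≤ 57)) :
    c ∈ gridChars := by
  have hco : Char.ofNat c.toNat = c := Char.ofNat_toNat c
  have hb1 : 48 ≤ c.toNat := by omega
  have hb2 : c.toNat ≤ 122 := by omega
  interval_cases h : c.toNat <;> first
    | (exfalso; omega)
    | (rw [← hco]; decide)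

set_option maxRecDepth 8000 in
theorem perchar (c : Char) :
    (match find_position (String.ofList [c]) with
     | none => [c]
     | some (row, col) => PySem.Int.toChars row ++ PySem.Int.toChars col)
    = (encB c).toList := by
  by_cases hr : (65 ≤ c.toNat ∧ c.toNat ≤ 90) ∨ (97 ≤ c.toNat ∧ c.toNat ≤ 122) ∨ (48 ≤ c.toNat ∧ c.toNat ≤ 57)
  · have hm := mem_gridChars_of_range c hr
    fin_cases hm <;> decide
  · have hnc : c ∉ gridChars := by
      intro hm
      fin_cases hm <;> revert hr <;> decide
    simp only [gridChars, List.mem_cons, List.not_mem_nil, or_false, not_or] at hnc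
    have hfp : find_position (String.ofList [c]) = none := by
      apply fpRows_none
      intro p hp item hi
      obtain ⟨k, hk, rfl⟩ := (PySem.List.mem_enumerate_iff _ _ _).mp hp
      have hmem : item ∈ textEncoder.flatten := List.mem_flatten.mpr ⟨_, List.getElem_mem hk, hi⟩
      intro heq
      rw [heq] at hmem
      revert hmem
      simp [textEncoder, ofList_singleton_eq_iff]
      simp_all [eq_comm]
    rw [hfp]
    have he : encB c = String.ofList [c] := by
      simp only [encB]
      split_ifs with h1 h2 h3 <;> first | (exfalso; omega) | rfl
    rw [he]
    simp

theorem foldl_snoc {α β : Type} (f : α → β) (l : List α) (acc : List β) :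
    l.foldl (fun out x => out ++ [f x]) acc = acc ++ l.map f := by
  induction l generalizing acc with
  | nil => simp
  | cons a t ih => simp [List.foldl, ih]

theorem join_nil_flatten (ls : List (List Char)) : PySem.Chars.join [] ls = ls.flatten := by
  show List.intercalate [] ls = ls.flatten
  rw [List.intercalate]
  induction ls with
  | nil => rfl
  | cons a t ih =>
    cases t with
    | nil => rfl
    | cons b t2 =>
      rw [List.intersperse_cons₂]
      simpa using ih

theorem main_eq (s : String) : spars_data s = spars_data_alt s := by
  rw [spars_data, spars_data_alt]
  have hbB : (fun (out : List String) (x : Char) =>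
      let n : Int := x.toNat
      if 65 ≤ n ∧ n ≤ 90 then
        out ++ [PySem.Int.toStr (PySem.Int.floordiv (n - 65) 8) ++ PySem.Int.toStr (PySem.Int.mod (n - 65) 8)]
      else if 97 ≤ n ∧ n ≤ 122 then
        out ++ [PySem.Int.toStr (PySem.Int.floordiv (n - 97 + 26) 8) ++ PySem.Int.toStr (PySem.Int.mod (n - 97 + 26) 8)]
      else if 48 ≤ n ∧ n ≤ 57 then
        out ++ [PySem.Int.toStr (PySem.Int.floordiv (n - 48 + 52) 8) ++ PySem.Int.toStr (PySem.Int.mod (n - 48 + 52) 8)]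
      else out ++ [String.ofList [x]])
      = (fun out x => out ++ [encB x]) := by
    funext acc x
    simp only [encB]
    split_ifs <;> rfl
  rw [hbB, foldl_snoc]
  have hbA : (fun (newData : List Char) (x : Char) =>
      match find_position (String.ofList [x]) with
      | none => newData ++ [x]
      | some (row, col) => newData ++ (PySem.Int.toChars row ++ PySem.Int.toChars col))
    = (fun newData x => newData ++ (encB x).toList) := by
    funext acc x
    rw [← perchar x]
    cases find_position (String.ofList [x]) with
    | none => rfl
    | some p => obtain ⟨r, cl⟩ := p; rfl
  rw [hbA, PySem.List.foldl_append_eq_flatMap]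
  rw [← String.ofList_toList (s := PySem.Str.join "" ([] ++ s.toList.map encB))]
  congr 1
  simp [PySem.Str.toList_join, join_nil_flatten, List.flatMap_def, Function.comp_def]

-- ===== VERDICT (by name: the statement is the Claim_ definition above) =====
theorem spars_data_spec : Claim_equal_spars_data := by
  intro s _
  unfold Spec_spars_data
  exact main_eq s
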